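-- pv_equiv track=rewrite | github.com/MarkusRabe/py-aiger-analysis | aiger_analysis/cadet.py | simplify_quantifier_prefix
-- ===== SOURCE A (Python) =====
-- def simplify_quantifier_prefix(quantifiers):
--     seen_variables = set()
--     simplified_q = []
--     for q, variables in quantifiers:
--         variables = list(map(str, variables))
--         assert len(seen_variables & set(variables)) is 0
--         seen_variables |= set(variables)
--         if len(variables) == 0:
--             continue
--         else:
--             if len(simplified_q) > 0 and simplified_q[-1][0] == q:
--                 (last_q, last_vars) = simplified_q[-1]
--                 simplified_q[-1] = (last_q, last_vars + variables)
--             else: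
--                 simplified_q.append((q, variables))
--     return simplified_q
-- ===== SOURCE B (Python) =====
-- def simplify_quantifier_prefix(quantifiers):
--     # Pass 1: stringify and drop empty blocks.
--     blocks = [(q, [str(v) for v in vs]) for q, vs in quantifiers if len(vs) > 0]
--     # Pass 2: run-length merge of adjacent blocks with the same quantifier type.
--     result = []
--     i = 0
--     n = len(blocks)
--     while i < n:
--         q = blocks[i][0]
--         merged = []
--         j = i
--         while j < n and blocks[j][0] == q:
--             merged += blocks[j][1]
--             j += 1
--         result.append((q, merged))
--         i = j
--     return result
-- ===== Notes on version B (the rewrite author's own statement) =====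
-- stated objective: alternative
-- what changed: Replaces A's single stateful loop that mutates the last accumulated block with a two-pass scheme: first filter out empty blocks, then run-length merge adjacent same-quantifier blocks with a two-pointer while loop.
import Mathlib
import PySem

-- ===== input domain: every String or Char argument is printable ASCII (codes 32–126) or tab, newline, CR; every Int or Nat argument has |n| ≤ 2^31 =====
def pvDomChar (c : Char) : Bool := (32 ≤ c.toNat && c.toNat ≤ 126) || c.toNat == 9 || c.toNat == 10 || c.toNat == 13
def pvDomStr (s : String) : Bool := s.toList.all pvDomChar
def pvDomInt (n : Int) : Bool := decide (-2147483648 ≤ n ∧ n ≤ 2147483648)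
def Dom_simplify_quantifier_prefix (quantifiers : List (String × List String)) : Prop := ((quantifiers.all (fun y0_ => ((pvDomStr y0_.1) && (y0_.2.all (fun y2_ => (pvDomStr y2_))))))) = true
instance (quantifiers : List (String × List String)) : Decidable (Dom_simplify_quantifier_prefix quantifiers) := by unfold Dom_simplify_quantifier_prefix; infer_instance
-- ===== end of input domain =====

-- B restructures A's single stateful merge loop into two passes (filter empties, then run-length
-- merge adjacent same-type blocks with a two-pointer scan); objective: alternative decomposition.


-- ===== PORT A =====
-- A's else-branch: read simplified_q[-1], merge into it or append a fresh block.
def pvMergeLast (acc : List (String × List String)) (q : String) (vars0 : List String) : List (String × List String) :=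
  if acc.length > 0 && (acc.getLastD ("", [])).1 == q then
    acc.dropLast ++ [((acc.getLastD ("", [])).1, (acc.getLastD ("", [])).2 ++ vars0)]
  else
    acc ++ [(q, vars0)]

def simplify_quantifier_prefix (quantifiers : List (String × List String)) : List (String × List String) :=
  (quantifiers.foldl
    (fun (st : PySem.Set String × List (String × List String)) qv =>
      let vars0 := qv.2     -- variables = list(map(str, variables)): str is the identity on str inputs
      -- assert len(seen_variables & set(vars0)) == 0: holds on Pre_, raises (excluded) otherwise
      let seen := PySem.Set.union st.1 vars0   -- seen_variables |= set(vars0)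
      if vars0.length = 0 then (seen, st.2)
      else (seen, pvMergeLast st.2 qv.1 vars0))
    (PySem.Set.empty, [])).2

-- ===== PORT B =====
-- B's outer while loop: each step consumes one whole run of equal-quantifier blocks
-- (the inner 'while j < n and blocks[j][0] == q' is the takeWhile/dropWhile split).
def pvAltGroup : List (String × List String) → List (String × List String)
  | [] => []
  | (q, vs) :: rest =>
      (q, vs ++ (rest.takeWhile (fun b => b.1 == q)).flatMap Prod.snd)
        :: pvAltGroup (rest.dropWhile (fun b => b.1 == q))
termination_by l => l.length
decreasing_by
  exact Nat.lt_succ_of_le (List.length_dropWhile_le _ _)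

def simplify_quantifier_prefix_alt (quantifiers : List (String × List String)) : List (String × List String) :=
  -- pass 1: [(q, [str(v) for v in vs]) for q, vs in quantifiers if len(vs) > 0]
  pvAltGroup (quantifiers.filter (fun b => 0 < b.2.length))

-- ===== PRECONDITION & SPEC =====
-- Pre_ excludes exactly the inputs on which A's assert raises AssertionError:
-- some variable occurring in two distinct blocks of the prefix.
def Pre_simplify_quantifier_prefix (quantifiers : List (String × List String)) : Prop :=
  List.Pairwise (fun a b => ∀ v ∈ a.2, v ∉ b.2) quantifiers

instance (quantifiers : List (String × List String)) : Decidable (Pre_simplify_quantifier_prefix quantifiers) := by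
  unfold Pre_simplify_quantifier_prefix; infer_instance

def pvWitness_simplify_quantifier_prefix : (List (String × List String)) :=
  [("e", ["1", "2"]), ("a", []), ("e", ["3"]), ("a", ["4"])]

def Spec_simplify_quantifier_prefix (quantifiers : List (String × List String)) (out : List (String × List String)) : Prop := out = simplify_quantifier_prefix_alt quantifiers
instance (quantifiers : List (String × List String)) (out : List (String × List String)) : Decidable (Spec_simplify_quantifier_prefix quantifiers out) := by unfold Spec_simplify_quantifier_prefix; infer_instance

-- ===== CLAIM (what is proved, stated in full; the proofs are below) =====
def Claim_equal_simplify_quantifier_prefix : Prop := ∀ (quantifiers : List (String × List String)), Dom_simplify_quantifier_prefix quantifiers → Pre_simplify_quantifier_prefix quantifiers → Spec_simplify_quantifier_prefix quantifiers (simplify_quantifier_prefix quantifiers)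

-- ===== LEMMAS AND PROOFS =====

-- A's fold, projected to its output component, is the merge-step fold over the non-empty blocks.
theorem pvFoldA_filter (qs : List (String × List String)) (s : PySem.Set String)
    (acc : List (String × List String)) :
    (qs.foldl
      (fun (st : PySem.Set String × List (String × List String)) qv =>
        let vars0 := qv.2
        let seen := PySem.Set.union st.1 vars0
        if vars0.length = 0 then (seen, st.2)
        else (seen, pvMergeLast st.2 qv.1 vars0))
      (s, acc)).2
    = (qs.filter (fun b => 0 < b.2.length)).foldl
        (fun acc b => pvMergeLast acc b.1 b.2) acc := by
  induction qs generalizing s acc with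
  | nil => rfl
  | cons hd tl ih =>
    simp only [List.foldl_cons, List.filter_cons]
    by_cases h : hd.2.length = 0
    · rw [if_pos h, if_neg (by simp [h])]
      exact ih _ _
    · rw [if_neg h, if_pos (by simp [Nat.pos_of_ne_zero h]), List.foldl_cons]
      exact ih _ _

theorem pvMergeLast_concat_eq (acc : List (String × List String)) (q : String)
    (vs vars : List String) :
    pvMergeLast (acc ++ [(q, vs)]) q vars = acc ++ [(q, vs ++ vars)] := by
  simp [pvMergeLast]

theorem pvMergeLast_concat_ne (acc : List (String × List String)) (q q' : String)
    (vs vars : List String) (h : q ≠ q') :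
    pvMergeLast (acc ++ [(q, vs)]) q' vars = (acc ++ [(q, vs)]) ++ [(q', vars)] := by
  simp [pvMergeLast, h]

-- the run-length invariant: folding the merge step from an accumulator ending in block (q, vs)
-- consumes exactly the leading run of q-blocks into that last block.
theorem pvFold_merge_group (blocks : List (String × List String)) :
    ∀ (acc : List (String × List String)) (q : String) (vs : List String),
    blocks.foldl (fun acc b => pvMergeLast acc b.1 b.2) (acc ++ [(q, vs)])
    = acc ++ (q, vs ++ (blocks.takeWhile (fun b => b.1 == q)).flatMap Prod.snd)
        :: pvAltGroup (blocks.dropWhile (fun b => b.1 == q)) := by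
  induction blocks with
  | nil => intro acc q vs; simp [pvAltGroup]
  | cons hd tl ih =>
    intro acc q vs
    obtain ⟨q', vs'⟩ := hd
    rw [List.foldl_cons]
    show List.foldl _ (pvMergeLast (acc ++ [(q, vs)]) q' vs') tl = _
    by_cases h : q' = q
    · subst h
      rw [pvMergeLast_concat_eq, ih acc q' (vs ++ vs')]
      simp
    · have h' : q ≠ q' := fun e => h e.symm
      have hb : (q' == q) = false := beq_eq_false_iff_ne.mpr h
      rw [pvMergeLast_concat_ne _ _ _ _ _ h', ih (acc ++ [(q, vs)]) q' vs']
      simp [hb, pvAltGroup]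

theorem pvFold_merge_eq_altGroup (blocks : List (String × List String)) :
    blocks.foldl (fun acc b => pvMergeLast acc b.1 b.2) [] = pvAltGroup blocks := by
  cases blocks with
  | nil => simp [pvAltGroup]
  | cons hd tl =>
    obtain ⟨q, vs⟩ := hd
    rw [List.foldl_cons]
    show List.foldl _ (pvMergeLast [] q vs) tl = _
    have h0 : pvMergeLast [] q vs = [] ++ [(q, vs)] := by simp [pvMergeLast]
    rw [h0, pvFold_merge_group tl [] q vs, pvAltGroup]
    simp

-- ===== VERDICT (by name: the statement is the Claim_ definition above) =====
theorem simplify_quantifier_prefix_spec : Claim_equal_simplify_quantifier_prefix := by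
  intro quantifiers _ _
  unfold Spec_simplify_quantifier_prefix simplify_quantifier_prefix simplify_quantifier_prefix_alt
  rw [pvFoldA_filter, pvFold_merge_eq_altGroup]
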